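-- pv_equiv track=rewrite | github.com/uditjain100/DataStructures | dsa/hashmap/method1.py | groupShiftedStrings
-- ===== SOURCE A (Python) =====
-- def groupShiftedStrings(arr):
--     map = {}
--     for s in arr:
--         isAdded = False
--
--         for k in map.keys():
--             if len(k) != len(s):
--                 continue
--             diff = ord(k[0]) - ord(s[0])
--             isMatchFound = True
--             for i in range(1, len(k)):
--                 if diff != ord(k[i]) - ord(s[i]):
--                     isMatchFound = False
--                     break
--             if isMatchFound:
--                 map[k].append(s)
--                 isAdded = True
--                 break
--
--         if isAdded == False:
--             map[s] = [s]
--     return map.values()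
-- ===== SOURCE B (Python) =====
-- def groupShiftedStrings(arr):
--     # One pass: canonical key = (length, consecutive char differences) into a dict.
--     groups = {}
--     for s in arr:
--         key = (len(s), tuple(ord(b) - ord(a) for a, b in zip(s, s[1:])))
--         g = groups.get(key)
--         if g is None:
--             groups[key] = [s]
--         else:
--             g.append(s)
--     return list(groups.values())
-- ===== Notes on version B (the rewrite author's own statement) =====
-- stated objective: faster
-- what changed: Replaced A's scan over all existing group keys (with a per-key character-by-character offset comparison) by a single pass that computes a canonical key (length, tuple of consecutive char differences) for each string and groups via one dict lookup.
import Mathlib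
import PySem

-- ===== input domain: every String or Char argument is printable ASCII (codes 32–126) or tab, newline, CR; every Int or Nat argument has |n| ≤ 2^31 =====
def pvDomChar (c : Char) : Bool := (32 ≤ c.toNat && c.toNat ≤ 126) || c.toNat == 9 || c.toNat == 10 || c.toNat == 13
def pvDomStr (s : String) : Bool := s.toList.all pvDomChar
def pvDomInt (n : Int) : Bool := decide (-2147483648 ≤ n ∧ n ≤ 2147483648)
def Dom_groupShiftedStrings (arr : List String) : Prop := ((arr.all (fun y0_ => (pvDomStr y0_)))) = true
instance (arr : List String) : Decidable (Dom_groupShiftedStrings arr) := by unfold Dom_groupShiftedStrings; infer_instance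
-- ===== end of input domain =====

-- B replaces A's scan over all existing group keys by a one-pass dict keyed by
-- (length, consecutive char differences); return value only (A returns a dict_values view).

-- ===== PORT A =====
-- inner loop 'for i in range(1, len(k)): if diff != ord(k[i]) - ord(s[i])' as structural
-- recursion over the two equal-length tails
def pvDiffConst (diff : Int) : List Char → List Char → Bool
  | a :: as, b :: bs =>
      (((a.toNat : Int) - (b.toNat : Int)) == diff) && pvDiffConst diff as bs
  | _, _ => true

-- the body of A's key loop: lengths equal, then constant offset from the first chars.
-- On k = s = [] Python A raises IndexError (ord(k[0])); that input is outside Pre_ below.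
def pvMatchA (k s : List Char) : Bool :=
  if k.length ≠ s.length then false
  else
    match k, s with
    | k0 :: kt, s0 :: st => pvDiffConst ((k0.toNat : Int) - (s0.toNat : Int)) kt st
    | _, _ => true

-- one iteration of A's outer loop: first matching key gets s appended, else new group
def pvStepA (d : PySem.Dict String (List String)) (s : String) :
    PySem.Dict String (List String) :=
  match d.keys.find? (fun k => pvMatchA k.toList s.toList) with
  | some k => d.insert k (d.getD k [] ++ [s])   -- map[k].append(s)
  | none => d.insert s [s]                      -- map[s] = [s]

def groupShiftedStrings (arr : List String) : List (List String) :=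
  (arr.foldl pvStepA PySem.Dict.empty).values

-- ===== PORT B =====
-- tuple(ord(b) - ord(a) for a, b in zip(s, s[1:]))
def pvDiffs : List Char → List Int
  | a :: b :: t => ((b.toNat : Int) - (a.toNat : Int)) :: pvDiffs (b :: t)
  | _ => []

def pvKey (s : String) : Int × List Int := ((s.toList.length : Int), pvDiffs s.toList)

def pvStepB (d : PySem.Dict (Int × List Int) (List String)) (s : String) :
    PySem.Dict (Int × List Int) (List String) :=
  match d.get? (pvKey s) with
  | some g => d.insert (pvKey s) (g ++ [s])     -- g.append(s)
  | none => d.insert (pvKey s) [s]              -- groups[key] = [s]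

def groupShiftedStrings_alt (arr : List String) : List (List String) :=
  (arr.foldl pvStepB PySem.Dict.empty).values

-- ===== PRECONDITION & SPEC =====
-- Pre_ excludes lists containing two or more empty strings: there Python A raises
-- IndexError (ord(k[0]) with k = '' already a key); it returns on every other input.
def Pre_groupShiftedStrings (arr : List String) : Prop := arr.count "" ≤ 1
instance (arr : List String) : Decidable (Pre_groupShiftedStrings arr) := by
  unfold Pre_groupShiftedStrings; infer_instance

def pvWitness_groupShiftedStrings : List String := ["abc", "bcd", "xz", "yab", ""]

def Spec_groupShiftedStrings (arr : List String) (out : List (List String)) : Prop :=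
  out = groupShiftedStrings_alt arr
instance (arr : List String) (out : List (List String)) :
    Decidable (Spec_groupShiftedStrings arr out) := by unfold Spec_groupShiftedStrings; infer_instance

-- ===== CLAIM (what is proved, stated in full; the proofs are below) =====
def Claim_equal_groupShiftedStrings : Prop := ∀ (arr : List String),
  Dom_groupShiftedStrings arr → Pre_groupShiftedStrings arr →
  Spec_groupShiftedStrings arr (groupShiftedStrings arr)

-- ===== LEMMAS AND PROOFS =====

theorem pvDiffConst_eq_diffs (as bs : List Char) (a0 b0 : Char)
    (hlen : as.length = bs.length)
    (hd : (a0.toNat : Int) - (b0.toNat : Int) = d) :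
    pvDiffConst d as bs = (pvDiffs (a0 :: as) == pvDiffs (b0 :: bs)) := by
  induction as generalizing bs a0 b0 with
  | nil =>
    cases bs with
    | nil => simp [pvDiffConst, pvDiffs]
    | cons b1 bt => simp at hlen
  | cons a1 at' ih =>
    cases bs with
    | nil => simp at hlen
    | cons b1 bt =>
      simp only [List.length_cons, Nat.add_right_cancel_iff] at hlen
      by_cases hcase : ((a1.toNat : Int) - (b1.toNat : Int)) = d
      · have h1 : ((a1.toNat : Int) - (a0.toNat : Int)) = ((b1.toNat : Int) - (b0.toNat : Int)) := by omega
        simp only [pvDiffConst, pvDiffs, hcase, beq_self_eq_true, Bool.true_and,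
          ih bt a1 b1 hlen hcase, List.cons_beq_cons, h1]
      · have h1 : ((a1.toNat : Int) - (a0.toNat : Int)) ≠ ((b1.toNat : Int) - (b0.toNat : Int)) := by omega
        simp only [pvDiffConst, pvDiffs, List.cons_beq_cons]
        rw [beq_eq_false_iff_ne.mpr hcase, beq_eq_false_iff_ne.mpr h1]
        simp

theorem pvBeqCongr {α β : Type} [BEq α] [LawfulBEq α] [BEq β] [LawfulBEq β]
    (a b : α) (c d : β) (h : a = b ↔ c = d) : (a == b) = (c == d) := by
  by_cases hab : a = b
  · simp [hab, h.mp hab]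
  · rw [beq_eq_false_iff_ne.mpr hab, beq_eq_false_iff_ne.mpr (fun hc => hab (h.mpr hc))]

theorem pvMatchA_eq (a b : List Char) :
    pvMatchA a b = (((a.length : Int), pvDiffs a) == ((b.length : Int), pvDiffs b)) := by
  by_cases hlen : a.length = b.length
  · cases a with
    | nil =>
      cases b with
      | nil => simp [pvMatchA, pvDiffs]
      | cons b0 bt => simp at hlen
    | cons a0 at' =>
      cases b with
      | nil => simp at hlen
      | cons b0 bt =>
        simp only [List.length_cons, Nat.add_right_cancel_iff] at hlen
        have hm : pvMatchA (a0 :: at') (b0 :: bt)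
            = pvDiffConst ((a0.toNat : Int) - (b0.toNat : Int)) at' bt := by
          simp [pvMatchA, hlen]
        rw [hm, pvDiffConst_eq_diffs at' bt a0 b0 hlen rfl]
        apply pvBeqCongr
        constructor
        · intro h; rw [h]; simp [hlen]
        · intro h; exact congrArg Prod.snd h
  · simp only [pvMatchA, ne_eq, hlen, not_false_eq_true, if_true]
    have hne : (((a.length : Int)), pvDiffs a) ≠ (((b.length : Int)), pvDiffs b) := by
      intro h
      apply hlen
      have h1 := congrArg Prod.fst h
      simp only at h1
      exact_mod_cast h1
    exact (beq_eq_false_iff_ne.mpr hne).symm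

theorem pvMatchA_eq_key (k s : String) :
    pvMatchA k.toList s.toList = (pvKey k == pvKey s) := pvMatchA_eq _ _

theorem find?_congr_mem {α : Type} (l : List α) (p q : α → Bool)
    (h : ∀ x ∈ l, p x = q x) : l.find? p = l.find? q := by
  induction l with
  | nil => rfl
  | cons x t ih =>
    simp only [List.find?_cons, h x (List.mem_cons_self)]
    cases q x <;> simp [ih (fun y hy => h y (List.mem_cons_of_mem _ hy))]

-- the invariant relating A's dict to B's dict
def pvInv (dA : PySem.Dict String (List String))
    (dB : PySem.Dict (Int × List Int) (List String)) : Prop :=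
  dB.items = dA.items.map (fun p => (pvKey p.1, p.2)) ∧
  (dA.items.map (fun p => pvKey p.1)).Nodup

theorem pvStep_inv (dA : PySem.Dict String (List String))
    (dB : PySem.Dict (Int × List Int) (List String)) (s : String)
    (h : pvInv dA dB) : pvInv (pvStepA dA s) (pvStepB dB s) := by
  obtain ⟨hitems, hnd⟩ := h
  have hfind : dA.keys.find? (fun k => pvMatchA k.toList s.toList)
      = dA.keys.find? (fun k => pvKey k == pvKey s) :=
    find?_congr_mem _ _ _ (fun k _ => pvMatchA_eq_key k s)
  -- B's lookup in terms of A's items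
  have hBfind : dB.items.find? (fun q => q.1 == pvKey s)
      = (dA.items.find? (fun p => pvKey p.1 == pvKey s)).map (fun p => (pvKey p.1, p.2)) := by
    rw [hitems, List.find?_map]; rfl
  have hkeys : dA.keys = dA.items.map (fun p => p.1) := rfl
  cases hA : dA.items.find? (fun p => pvKey p.1 == pvKey s) with
  | none =>
    -- no existing group matches: both sides append a fresh entry
    have hnone : ∀ p ∈ dA.items, ¬ (pvKey p.1 = pvKey s) := by
      intro p hp
      have := List.find?_eq_none.mp hA p hp
      simpa using this
    have hfindK : dA.keys.find? (fun k => pvMatchA k.toList s.toList) = none := by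
      rw [hfind, hkeys, List.find?_map]
      have : dA.items.find? ((fun k => pvKey k == pvKey s) ∘ (fun p => p.1)) = none := by
        apply List.find?_eq_none.mpr
        intro p hp; simpa using hnone p hp
      simp [this]
    have hAcont : dA.contains s = false := by
      apply Bool.not_eq_true _ |>.mp
      intro hc
      simp only [PySem.Dict.contains, List.any_eq_true] at hc
      obtain ⟨p, hp, hps⟩ := hc
      exact hnone p hp (by rw [eq_of_beq hps])
    have hBcont : dB.contains (pvKey s) = false := by
      apply Bool.not_eq_true _ |>.mp
      intro hc
      simp only [PySem.Dict.contains, List.any_eq_true] at hc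
      obtain ⟨q, hq, hqs⟩ := hc
      rw [hitems] at hq
      obtain ⟨p, hp, rfl⟩ := List.mem_map.mp hq
      exact hnone p hp (eq_of_beq hqs)
    have hBget : dB.get? (pvKey s) = none := by
      simp only [PySem.Dict.get?, hBfind, hA]; rfl
    constructor
    · simp only [pvStepA, pvStepB, hfindK, hBget, PySem.Dict.insert, hAcont, hBcont,
        if_false, Bool.false_eq_true]
      rw [hitems]; simp
    · simp only [pvStepA, hfindK, PySem.Dict.insert, hAcont, Bool.false_eq_true, if_false]
      simp only [List.map_append, List.map_cons, List.map_nil]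
      rw [List.nodup_append]
      refine ⟨hnd, List.nodup_singleton _, ?_⟩
      intro x hx y hy
      rw [List.mem_singleton] at hy
      subst hy
      obtain ⟨p, hp, rfl⟩ := List.mem_map.mp hx
      exact fun hc => hnone p hp hc
  | some p₀ =>
    -- first matching group found: both sides extend that group in place
    have hp₀mem : p₀ ∈ dA.items := List.mem_of_find?_eq_some hA
    have hp₀key : pvKey p₀.1 = pvKey s := by
      have := List.find?_some hA; simpa using this
    have hfindK : dA.keys.find? (fun k => pvMatchA k.toList s.toList) = some p₀.1 := by
      rw [hfind, hkeys, List.find?_map]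
      have : dA.items.find? ((fun k => pvKey k == pvKey s) ∘ (fun p => p.1)) = some p₀ := by
        simpa [Function.comp] using hA
      simp [this]
    -- key uniqueness: an item has key p₀.1 iff its pvKey is pvKey s
    have huniq : ∀ p ∈ dA.items, (p.1 = p₀.1 ↔ pvKey p.1 = pvKey s) := by
      intro p hp
      constructor
      · intro he; rw [he]; exact hp₀key
      · intro he
        have := List.inj_on_of_nodup_map hnd hp hp₀mem (by rw [he, hp₀key])
        exact congrArg Prod.fst this
    have hAcont : dA.contains p₀.1 = true := by
      simp only [PySem.Dict.contains, List.any_eq_true]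
      exact ⟨p₀, hp₀mem, by simp⟩
    have hBcont : dB.contains (pvKey s) = true := by
      simp only [PySem.Dict.contains, List.any_eq_true]
      refine ⟨(pvKey p₀.1, p₀.2), ?_, by simp [hp₀key]⟩
      rw [hitems]; exact List.mem_map_of_mem hp₀mem
    -- the two getD values agree
    have hAget : dA.get? p₀.1 = some p₀.2 := by
      simp only [PySem.Dict.get?]
      have : dA.items.find? (fun p => p.1 == p₀.1) = some p₀ := by
        rw [find?_congr_mem _ _ (fun p => pvKey p.1 == pvKey s)
          (fun p hp => by simpa using (huniq p hp))]
        exact hA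
      simp [this]
    have hBget : dB.get? (pvKey s) = some p₀.2 := by
      simp only [PySem.Dict.get?, hBfind, hA]; rfl
    have hAgetD : dA.getD p₀.1 [] = p₀.2 := by
      simp [PySem.Dict.getD_eq_get?_getD, hAget]
    constructor
    · simp only [pvStepA, pvStepB, hfindK, hBget, PySem.Dict.insert, hAcont, hBcont,
        if_true, hAgetD]
      rw [hitems, List.map_map, List.map_map]
      apply List.map_congr_left
      intro p hp
      by_cases he : p.1 = p₀.1
      · have hk : pvKey p.1 = pvKey s := (huniq p hp).mp he
        simp [Function.comp, he, hp₀key]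
      · have hk : ¬ (pvKey p.1 = pvKey s) := fun hc => he ((huniq p hp).mpr hc)
        simp [Function.comp, beq_eq_false_iff_ne.mpr he, beq_eq_false_iff_ne.mpr hk]
    · simp only [pvStepA, hfindK, PySem.Dict.insert, hAcont, if_true]
      rw [List.map_map]
      have : dA.items.map ((fun p => pvKey p.1) ∘ fun p =>
          if (p.1 == p₀.1) = true then (p₀.1, dA.getD p₀.1 [] ++ [s]) else p)
          = dA.items.map (fun p => pvKey p.1) := by
        apply List.map_congr_left
        intro p _
        by_cases he : p.1 = p₀.1
        · simp [Function.comp, he]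
        · simp [Function.comp, beq_eq_false_iff_ne.mpr he]
      rw [this]; exact hnd

theorem pvFold_inv (arr : List String) (dA : PySem.Dict String (List String))
    (dB : PySem.Dict (Int × List Int) (List String)) (h : pvInv dA dB) :
    pvInv (arr.foldl pvStepA dA) (arr.foldl pvStepB dB) := by
  induction arr generalizing dA dB with
  | nil => exact h
  | cons s t ih => exact ih _ _ (pvStep_inv dA dB s h)

-- ===== VERDICT (by name: the statement is the Claim_ definition above) =====
theorem groupShiftedStrings_spec : Claim_equal_groupShiftedStrings := by
  intro arr _ _
  unfold Spec_groupShiftedStrings groupShiftedStrings groupShiftedStrings_alt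
  obtain ⟨hitems, -⟩ := pvFold_inv arr PySem.Dict.empty PySem.Dict.empty ⟨rfl, List.nodup_nil⟩
  show (arr.foldl pvStepA PySem.Dict.empty).values = (arr.foldl pvStepB PySem.Dict.empty).values
  simp only [PySem.Dict.values, hitems, List.map_map]
  rfl
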